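-- pv_equiv track=rewrite | github.com/RobertHan96/programmers_algorithm | 문자열 내림차순으로 배열하기.py | solution
-- ===== SOURCE A (Python) =====
-- def solution(s):  # 내가 짠 코드
--     answer = ''
--     uppers = []
--     lowers = []
--     for i in s:
--         if ord(i) < 97:
--             uppers.append(ord(i))
--         else:
--             lowers.append(ord(i))
--     lowers.sort(reverse=True)
--     uppers.sort(reverse=True)
--     for i in lowers:
--         answer += chr(i)
--     for i in uppers:
--         answer += chr(i)
--     return answer
-- ===== SOURCE B (Python) =====
-- def solution(s):
--     counts = {}
--     for ch in s:
--         counts[ch] = counts.get(ch, 0) + 1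
--     parts = []
--     for code in range(126, 96, -1):
--         parts.append(chr(code) * counts.get(chr(code), 0))
--     for code in range(96, -1, -1):
--         parts.append(chr(code) * counts.get(chr(code), 0))
--     return ''.join(parts)
-- ===== Notes on version B (the rewrite author's own statement) =====
-- stated objective: faster
-- what changed: Replaced the two comparison sorts of ord lists (list.sort(reverse=True)) by a one-pass counting sort: a dict tally of the characters, then the output is emitted directly by scanning the ASCII codes 126..97 and 96..0 in descending order and repeating each character by its count.
import Mathlib
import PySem

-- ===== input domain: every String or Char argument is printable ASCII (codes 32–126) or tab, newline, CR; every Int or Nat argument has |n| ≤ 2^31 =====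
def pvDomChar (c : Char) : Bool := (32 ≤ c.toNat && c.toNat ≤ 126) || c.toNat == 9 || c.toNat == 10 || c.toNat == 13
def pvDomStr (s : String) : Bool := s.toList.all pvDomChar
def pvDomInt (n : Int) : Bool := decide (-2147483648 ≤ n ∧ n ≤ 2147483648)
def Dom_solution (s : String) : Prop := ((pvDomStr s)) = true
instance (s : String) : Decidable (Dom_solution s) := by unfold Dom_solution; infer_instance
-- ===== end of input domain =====

-- B replaces A's two comparison sorts by a counting sort over the ASCII codes (a dict tally, then
-- codes 126..97 and 96..0 emitted in descending order, each repeated by its count); measured faster.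

-- ===== PORT A =====
-- Python string concatenation 'answer += chr(i)' is ported as a List Char accumulator, built into a
-- String at the end; ord(i) is (i.toNat : Int) and chr(i) is Char.ofNat i.toNat (exact for the ord
-- values that occur here, which are valid code points).
def solution (s : String) : String :=
  let ul := s.toList.foldl
    (fun (p : List Int × List Int) i =>
      if (i.toNat : Int) < 97 then (p.1 ++ [(i.toNat : Int)], p.2)
      else (p.1, p.2 ++ [(i.toNat : Int)]))
    ([], [])
  let lowers := PySem.List.sorted ul.2 (fun x => x) true
  let uppers := PySem.List.sorted ul.1 (fun x => x) true
  let answer := lowers.foldl (fun acc i => acc ++ [Char.ofNat i.toNat]) ([] : List Char)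
  let answer := uppers.foldl (fun acc i => acc ++ [Char.ofNat i.toNat]) answer
  String.mk answer

-- ===== PORT B =====
-- 'chr(code) * n' is List.replicate n.toNat (Char.ofNat code.toNat); ''.join(parts) is parts.flatten.
def solution_alt (s : String) : String :=
  let counts := s.toList.foldl
    (fun (d : PySem.Dict Char Int) ch => d.insert ch (d.getD ch 0 + 1)) PySem.Dict.empty
  let parts := (PySem.List.pyRange 126 96 (-1)).foldl
    (fun (acc : List (List Char)) code =>
      acc ++ [List.replicate (counts.getD (Char.ofNat code.toNat) 0).toNat (Char.ofNat code.toNat)]) []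
  let parts := (PySem.List.pyRange 96 (-1) (-1)).foldl
    (fun (acc : List (List Char)) code =>
      acc ++ [List.replicate (counts.getD (Char.ofNat code.toNat) 0).toNat (Char.ofNat code.toNat)]) parts
  String.mk parts.flatten

-- ===== PRECONDITION & SPEC =====
def Spec_solution (s : String) (out : String) : Prop := out = solution_alt s
instance (s : String) (out : String) : Decidable (Spec_solution s out) := by unfold Spec_solution; infer_instance

-- ===== CLAIM (what is proved, stated in full; the proofs are below) =====
def Claim_equal_solution : Prop := ∀ (s : String), Dom_solution s → Spec_solution s (solution s)

-- ===== LEMMAS AND PROOFS =====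

lemma toNat_ofNat_small (n : Nat) (h : n ≤ 126) : (Char.ofNat n).toNat = n := by
  unfold Char.ofNat
  split
  · rfl
  · next hv => exact absurd (by simp [Nat.isValidChar]; omega) hv

lemma char_eq_of_toNat {a b : Char} (h : a.toNat = b.toNat) : a = b :=
  Char.ext (UInt32.toNat_inj.mp h)

-- A's partition loop over the characters, characterized by filters.
lemma partition_foldl (cs : List Char) (u l : List Int) :
    cs.foldl (fun (p : List Int × List Int) i =>
      if (i.toNat : Int) < 97 then (p.1 ++ [(i.toNat : Int)], p.2)
      else (p.1, p.2 ++ [(i.toNat : Int)])) (u, l)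
    = (u ++ (cs.filter (fun c => decide ((c.toNat : Int) < 97))).map (fun c => (c.toNat : Int)),
       l ++ (cs.filter (fun c => !decide ((c.toNat : Int) < 97))).map (fun c => (c.toNat : Int))) := by
  induction cs generalizing u l with
  | nil => simp
  | cons c cs ih =>
    simp only [List.foldl_cons]
    by_cases h : c.toNat < 97
    · have h2 : ¬ 97 ≤ c.toNat := by omega
      rw [if_pos (by exact_mod_cast h), ih]
      simp [h]
    · have h2 : 97 ≤ c.toNat := by omega
      rw [if_neg (by exact_mod_cast h), ih]
      simp [h]

lemma count_flatMap_replicate (codes : List Int) (hnd : codes.Nodup) (n : Int → Nat) (y : Int) :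
    (codes.flatMap (fun c => List.replicate (n c) c)).count y
      = if y ∈ codes then n y else 0 := by
  induction codes with
  | nil => simp
  | cons c codes ih =>
    simp only [List.flatMap_cons, List.count_append, List.count_replicate,
      List.nodup_cons] at *
    rcases hnd with ⟨hc, hnd⟩
    by_cases hy : c = y
    · subst hy
      simp [ih hnd, hc]
    · simp [hy, ih hnd, List.mem_cons, Ne.symm hy]

lemma pairwise_flatMap_replicate (codes : List Int)
    (h : codes.Pairwise (fun a b => b ≤ a)) (n : Int → Nat) :
    (codes.flatMap (fun c => List.replicate (n c) c)).Pairwise (fun a b => b ≤ a) := by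
  induction codes with
  | nil => simp
  | cons c codes ih =>
    simp only [List.flatMap_cons, List.pairwise_append]
    rcases List.pairwise_cons.mp h with ⟨hc, h'⟩
    refine ⟨List.pairwise_replicate.mpr (Or.inr le_rfl), ih h', ?_⟩
    intro a ha b hb
    rcases List.eq_of_mem_replicate ha with rfl
    obtain ⟨d, hd, hbd⟩ := List.mem_flatMap.mp hb
    rcases List.eq_of_mem_replicate hbd with rfl
    exact hc _ hd

lemma pyRange_desc_pairwise (a b : Int) :
    (PySem.List.pyRange a b (-1)).Pairwise (fun x y => y ≤ x) := by
  rw [PySem.List.pyRange_neg_one_eq_reverse, List.pairwise_reverse]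
  exact (PySem.List.pairwise_lt_pyRange_one (b+1) (a+1)).imp (fun h => le_of_lt h)

lemma pyRange_desc_nodup (a b : Int) : (PySem.List.pyRange a b (-1)).Nodup := by
  rw [PySem.List.pyRange_neg_one_eq_reverse]
  exact List.nodup_reverse.mpr (PySem.List.nodup_pyRange_one (b+1) (a+1))

-- Python's sorted(xs, reverse=True) on an Int list whose values all lie in (b, a] is exactly the
-- counting-sort output over the countdown range(a, b, -1).
lemma sorted_rev_eq_flatMap (xs : List Int) (a b : Int)
    (hmem : ∀ y ∈ xs, b < y ∧ y ≤ a) :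
    PySem.List.sorted xs (fun x => x) true
      = (PySem.List.pyRange a b (-1)).flatMap (fun i => List.replicate (xs.count i) i) := by
  apply PySem.List.eq_of_perm_of_pairwise_le_of_injective (fun x : Int => -x) neg_injective
  · refine (PySem.List.sorted_perm xs _ true).trans (List.perm_iff_count.mpr fun y => ?_)
    rw [count_flatMap_replicate _ (pyRange_desc_nodup a b)]
    by_cases hy : y ∈ PySem.List.pyRange a b (-1)
    · simp [hy]
    · simp only [hy, if_false]
      refine List.count_eq_zero.mpr fun hmemy => hy ?_
      exact PySem.List.mem_pyRange_neg_one.mpr (hmem y hmemy)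
  · exact (PySem.List.sorted_pairwise_rev xs (fun x => x)).imp (fun h => neg_le_neg h)
  · exact (pairwise_flatMap_replicate _ (pyRange_desc_pairwise a b) _).imp (fun h => neg_le_neg h)

-- counting the ord value y in the filtered-and-mapped list = counting the character chr(y) in cs.
lemma count_map_ord (cs : List Char) (q : Char → Bool) (y : Int)
    (hy1 : 0 ≤ y) (hy2 : y ≤ 126) (hq : q (Char.ofNat y.toNat) = true) :
    ((cs.filter q).map (fun c => (c.toNat : Int))).count y
      = cs.count (Char.ofNat y.toNat) := by
  rw [List.count_eq_countP, List.countP_map, List.count_eq_countP]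
  rw [List.countP_filter]
  refine List.countP_congr fun c _ => ?_
  by_cases hc : c = Char.ofNat y.toNat
  · subst hc
    have h1 : (Char.ofNat y.toNat).toNat = y.toNat := toNat_ofNat_small _ (by omega)
    simp [Function.comp, h1, Int.toNat_of_nonneg hy1, hq]
  · have h2 : ¬ ((c.toNat : Int) = y) := by
      intro he
      exact hc (char_eq_of_toNat (by rw [toNat_ofNat_small _ (by omega)]; omega))
    simp [Function.comp, h2, hc]

-- the two count expressions agree on each emitted code
lemma counts_agree (cs : List Char) :
    ∀ i ∈ PySem.List.pyRange 126 96 (-1),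
      ((cs.filter (fun c => !decide ((c.toNat : Int) < 97))).map (fun c => (c.toNat : Int))).count i
        = cs.count (Char.ofNat i.toNat) := by
  intro i hi
  obtain ⟨h1, h2⟩ := PySem.List.mem_pyRange_neg_one.mp hi
  refine count_map_ord cs _ i (by omega) h2 ?_
  have : (Char.ofNat i.toNat).toNat = i.toNat := toNat_ofNat_small _ (by omega)
  simp [this]
  omega

lemma counts_agree' (cs : List Char) :
    ∀ i ∈ PySem.List.pyRange 96 (-1) (-1),
      ((cs.filter (fun c => decide ((c.toNat : Int) < 97))).map (fun c => (c.toNat : Int))).count i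
        = cs.count (Char.ofNat i.toNat) := by
  intro i hi
  obtain ⟨h1, h2⟩ := PySem.List.mem_pyRange_neg_one.mp hi
  refine count_map_ord cs _ i (by omega) (by omega) ?_
  have : (Char.ofNat i.toNat).toNat = i.toNat := toNat_ofNat_small _ (by omega)
  simp [this]
  omega

-- ===== VERDICT (by name: the statement is the Claim_ definition above) =====
theorem solution_spec : Claim_equal_solution := by
  intro s hdom
  have hdc : ∀ c ∈ s.toList, c.toNat ≤ 126 := by
    intro c hc
    have := List.all_eq_true.mp (by simpa [Dom_solution, pvDomStr] using hdom) c hc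
    simp [pvDomChar] at this
    omega
  unfold Spec_solution
  simp only [solution, solution_alt]
  rw [partition_foldl, PySem.Dict.foldl_insert_getD_add_one_eq_counter]
  simp only [List.nil_append, PySem.List.foldl_append_singleton_eq_map,
    PySem.Dict.getD_counter, Int.toNat_natCast, List.flatten_append]
  congr 1
  congr 1
  · rw [sorted_rev_eq_flatMap _ 126 96 ?_, ← List.flatMap_def, List.map_flatMap]
    · refine List.flatMap_congr fun i hi => ?_
      simp only [List.map_replicate]
      congr 1
      exact counts_agree s.toList i hi
    · intro y hy
      obtain ⟨c, hc, hcy⟩ := List.mem_map.mp hy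
      obtain ⟨hcm, hcf⟩ := List.mem_filter.mp hc
      subst hcy
      have := hdc c hcm
      simp at hcf
      constructor <;> omega
  · rw [sorted_rev_eq_flatMap _ 96 (-1) ?_, ← List.flatMap_def, List.map_flatMap]
    · refine List.flatMap_congr fun i hi => ?_
      simp only [List.map_replicate]
      congr 1
      exact counts_agree' s.toList i hi
    · intro y hy
      obtain ⟨c, hc, hcy⟩ := List.mem_map.mp hy
      obtain ⟨hcm, hcf⟩ := List.mem_filter.mp hc
      subst hcy
      simp at hcf
      constructor <;> omega
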